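-- pv_equiv track=rewrite | github.com/user-jm/multi-lvl-Coincidence-Analysis | causal_structure_R_data_to_pdf_graph.py | get_components_from_formula
-- ===== SOURCE A (Python) =====
-- def get_components_from_formula(st, factor_list):
--     # returns a list of the elements of factor_list that appear in the input string st
--     # the returned list is empty if no factor from factor_list appears in st or factor_list is empty, no list of strings or no list at all
--
--     component_list = []                          # declaration of the list
--
--     # since we use several nested lists of causal factors, we have to treat all cases separately
--     # - the factors are elements of the list as in factor_list from main -> first case
--     # - the factors are elements of the elements of the list as in level_factor_list from main -> second case
--     # - the factors are elements of elements of the elements of the list as in level_factor_list_order from main -> third case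
--
--     if isinstance(factor_list[0], str) :
--         # first case: check the elements from factor_list
--         for element in factor_list :
--             if st.find(element) > -1 :
--                 component_list.append(element)
--
--     elif isinstance(factor_list[0], list) :
--         if isinstance(factor_list[0][0], str) :
--             # second case: traverse the sublists of factor_list and check for occurrences in st
--             for m in range(len(factor_list)) :
--                 for element in factor_list[m] :
--                     if st.find(element) > -1 :
--                         component_list.append(element)
--
--         elif isinstance(factor_list[0][0], list) :
--             if isinstance(factor_list[0][0][0], str) :
--                 # third case: traverse the subsublists of factor_list and check for occurrences in st
--                 for m in range(len(factor_list)) :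
--                     for o in range(len(factor_list[m])) :
--                         for element in factor_list[m][o] :
--                             if st.find(element) > -1 :
--                                 component_list.append(element)
--
--     return component_list
-- ===== SOURCE B (Python) =====
-- def _flatten(x):
--     # structural recursion: yield every string inside an arbitrarily nested list
--     if isinstance(x, str):
--         yield x
--     else:
--         for item in x:
--             yield from _flatten(item)
--
-- def get_components_from_formula(st, factor_list):
--     # Different algorithm: instead of running a substring search st.find(e) for
--     # every factor, build (once) an index of every substring of st whose length
--     # is the length of some factor; then one pass keeps the factors, in
--     # encounter order, that are in the index.
--     factors = list(_flatten(factor_list))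
--     n = len(st)
--     index = {st[i:i + l] for l in {len(e) for e in factors} for i in range(n - l + 1)}
--     return [e for e in factors if e in index]
-- ===== Notes on version B (the rewrite author's own statement) =====
-- stated objective: alternative
-- what changed: B replaces A's per-factor substring search (st.find for every element inside depth-dispatched nested index loops) by building once a set index of all substrings of st at the factor lengths and filtering the recursively flattened factors by set membership.
import Mathlib
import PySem

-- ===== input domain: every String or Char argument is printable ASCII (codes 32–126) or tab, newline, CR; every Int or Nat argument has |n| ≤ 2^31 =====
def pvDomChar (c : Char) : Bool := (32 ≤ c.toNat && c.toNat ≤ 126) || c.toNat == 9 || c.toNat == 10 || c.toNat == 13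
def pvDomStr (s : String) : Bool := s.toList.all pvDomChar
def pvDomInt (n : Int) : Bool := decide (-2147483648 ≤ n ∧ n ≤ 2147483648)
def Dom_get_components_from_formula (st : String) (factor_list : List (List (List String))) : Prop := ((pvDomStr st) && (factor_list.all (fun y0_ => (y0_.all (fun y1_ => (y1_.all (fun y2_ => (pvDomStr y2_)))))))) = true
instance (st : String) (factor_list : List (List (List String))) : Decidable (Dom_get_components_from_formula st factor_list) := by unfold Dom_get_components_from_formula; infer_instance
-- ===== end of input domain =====

-- One honest line: B builds a set index of st's substrings at the factor lengths and filters
-- the recursively flattened factors by membership, instead of A's depth-dispatched nested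
-- loops running st.find per element; objective: alternative (same task, different algorithm).
-- Under the type convention factor_list is depth 3, so A's isinstance-str branches never fire;
-- A's probes factor_list[0], factor_list[0][0], factor_list[0][0][0] raise IndexError on
-- empty prefixes — excluded by Pre_ (B simply returns the filtered factor list there).

-- ===== PORT A =====
def get_components_from_formula (st : String) (factor_list : List (List (List String))) : List String :=
  match factor_list.head? with
  | none => []            -- Python: IndexError at factor_list[0] (outside Pre_)
  | some f0 =>
    -- isinstance(factor_list[0], str) is False (it is a list); isinstance(…, list) is True
    match f0.head? with
    | none => []          -- Python: IndexError at factor_list[0][0] (outside Pre_)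
    | some f00 =>
      -- isinstance(factor_list[0][0], str) is False; isinstance(…, list) is True
      match f00.head? with
      | none => []        -- Python: IndexError at factor_list[0][0][0] (outside Pre_)
      | some _ =>
        -- third case: isinstance(factor_list[0][0][0], str) is True
        (PySem.List.pyRange 0 (factor_list.length : Int) 1).foldl (fun acc m =>
          let fm := PySem.List.pyGetD factor_list m []
          (PySem.List.pyRange 0 (fm.length : Int) 1).foldl (fun acc2 o =>
            let fmo := PySem.List.pyGetD fm o []
            fmo.foldl (fun acc3 e =>
              if PySem.Str.find st e > -1 then acc3 ++ [e] else acc3) acc2) acc) []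

-- ===== PORT B =====
-- _flatten's structural recursion, typed per level (a str is yielded; a list is traversed)
def pvFlat1 (x : String) : List String := [x]
def pvFlat2 (x : List String) : List String := x.flatMap pvFlat1
def pvFlat3 (x : List (List String)) : List String := x.flatMap pvFlat2
def pvFlatten (x : List (List (List String))) : List String := x.flatMap pvFlat3

def get_components_from_formula_alt (st : String) (factor_list : List (List (List String))) : List String :=
  let factors := pvFlatten factor_list
  let n := PySem.Str.len st
  let lengths : PySem.Set Int := PySem.Set.ofList (factors.map (fun e => PySem.Str.len e))
  let index : PySem.Set String := PySem.Set.ofList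
    (lengths.flatMap (fun l =>
      (PySem.List.pyRange 0 (n - l + 1) 1).map (fun i => PySem.Str.slice st (some i) (some (i + l)))))
  factors.filter (fun e => PySem.Set.contains index e)

-- ===== PRECONDITION & SPEC =====
-- Pre_ excludes exactly the inputs where A raises IndexError: the probes
-- factor_list[0], factor_list[0][0], factor_list[0][0][0] must all exist.
def Pre_get_components_from_formula (st : String) (factor_list : List (List (List String))) : Prop :=
  factor_list ≠ [] ∧ factor_list.headI ≠ [] ∧ factor_list.headI.headI ≠ []
instance (st : String) (factor_list : List (List (List String))) : Decidable (Pre_get_components_from_formula st factor_list) := by unfold Pre_get_components_from_formula; infer_instance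

def pvWitness_get_components_from_formula : String × List (List (List String)) :=
  ("A1*b2 + C3", [[["A1", "b2"], ["x"]], [["C3"]]])

def Spec_get_components_from_formula (st : String) (factor_list : List (List (List String))) (out : List String) : Prop := out = get_components_from_formula_alt st factor_list
instance (st : String) (factor_list : List (List (List String))) (out : List String) : Decidable (Spec_get_components_from_formula st factor_list out) := by unfold Spec_get_components_from_formula; infer_instance

-- ===== CLAIM (what is proved, stated in full; the proofs are below) =====
def Claim_equal_get_components_from_formula : Prop := ∀ (st : String) (factor_list : List (List (List String))), Dom_get_components_from_formula st factor_list → Pre_get_components_from_formula st factor_list → Spec_get_components_from_formula st factor_list (get_components_from_formula st factor_list)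

-- ===== LEMMAS AND PROOFS =====

-- folding "append the filtered block" over a list IS flatMap
theorem pv_foldl_blocks {α β : Type} (g : β → List α) :
    ∀ (l : List β) (acc : List α),
      l.foldl (fun a x => a ++ g x) acc = acc ++ l.flatMap g := by
  intro l
  induction l with
  | nil => intro acc; simp
  | cons x xs ih => intro acc; simp [List.foldl_cons, ih, List.flatMap_cons]

-- any slice take-of-drop is an infix
theorem pv_take_drop_infix {α : Type} (xs : List α) (k m : Nat) :
    (xs.drop m).take k <:+: xs :=
  ((xs.drop m).take_prefix k).isInfix.trans (xs.drop_suffix m).isInfix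

-- the key pointwise fact: for a factor e, membership in B's substring index at the
-- factor lengths coincides with "st.find(e) > -1"
theorem pv_index_mem (st : String) (factors : List String) (e : String) (he : e ∈ factors) :
    PySem.Set.contains
      (PySem.Set.ofList
        ((PySem.Set.ofList (factors.map (fun e => PySem.Str.len e))).flatMap (fun l =>
          (PySem.List.pyRange 0 (PySem.Str.len st - l + 1) 1).map
            (fun i => PySem.Str.slice st (some i) (some (i + l)))))) e
      = decide (PySem.Str.find st e > -1) := by
  have hfind : decide (PySem.Str.find st e > -1) = true ↔ e.toList <:+: st.toList := by
    rw [decide_eq_true_iff]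
    constructor
    · intro h; exact (PySem.Str.find_nonneg_iff st e).mp (by omega)
    · intro h; have := (PySem.Str.find_nonneg_iff st e).mpr h; omega
  have hlen : ∀ (x : String), PySem.Str.len x = (x.toList.length : Int) := by
    intro x; simp
  have hn : PySem.Str.len st = (st.toList.length : Int) := hlen st
  rw [Bool.eq_iff_iff, PySem.Set.contains_iff, PySem.Set.mem_ofList, hfind, List.mem_flatMap]
  constructor
  · rintro ⟨l, hl, hmem⟩
    rw [List.mem_map] at hmem
    obtain ⟨i, hi, rfl⟩ := hmem
    rw [PySem.List.mem_pyRange_one] at hi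
    rw [PySem.Set.mem_ofList, List.mem_map] at hl
    obtain ⟨e', _, rfl⟩ := hl
    have h0i : 0 ≤ i := hi.1
    have h0l : 0 ≤ PySem.Str.len e' := by rw [hlen]; positivity
    rw [PySem.Str.toList_slice, PySem.Chars.slice_eq_listSlice,
      PySem.List.slice_toNat _ h0i (by omega)]
    exact pv_take_drop_infix st.toList _ _
  · intro h
    obtain ⟨pre, suf, hps⟩ := h
    refine ⟨PySem.Str.len e, ?_, ?_⟩
    · rw [PySem.Set.mem_ofList, List.mem_map]
      exact ⟨e, he, rfl⟩
    · rw [List.mem_map]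
      refine ⟨(pre.length : Int), ?_, ?_⟩
      · rw [PySem.List.mem_pyRange_one]
        have : pre.length + e.toList.length + suf.length = st.toList.length := by
          rw [← hps]; simp; omega
        rw [hn, hlen e]
        omega
      · rw [← String.toList_inj, PySem.Str.toList_slice, PySem.Chars.slice_eq_listSlice,
          hlen e, PySem.List.slice_natCast_add, ← hps]
        rw [show pre ++ e.toList ++ suf = pre ++ (e.toList ++ suf) by simp,
          List.drop_left, List.take_left]

-- flattening singleton filters is filtering
theorem pv_flatten_map_filter_singleton {α : Type} (p : α → Bool) (l : List α) :
    (l.map (fun x => (([x]).filter p))).flatten = l.filter p := by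
  induction l with
  | nil => simp
  | cons x xs ih =>
    simp only [List.map_cons, List.flatten_cons]
    rw [ih]
    by_cases h : p x <;> simp [h]

-- A on a nonempty-prefix input is "flatten, then filter by find"
theorem pv_A_eq_filter (st : String) (L : List (List (List String))) (c : String)
    (f00' : List String) (f0' : List (List String)) (fl' : List (List (List String)))
    (hL : L = ((c :: f00') :: f0') :: fl') :
    get_components_from_formula st L
      = (pvFlatten L).filter (fun e => decide (PySem.Str.find st e > -1)) := by
  subst hL
  unfold get_components_from_formula
  simp only [List.head?]
  generalize (c :: f00') :: f0' = g0
  generalize (g0 :: fl' : List (List (List String))) = L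
  rw [PySem.List.foldl_pyRange_zero_pyGetD' L ([] : List (List String))
    (fun acc fm => (PySem.List.pyRange 0 (fm.length : Int) 1).foldl (fun acc2 o =>
      (PySem.List.pyGetD fm o []).foldl (fun acc3 e =>
        if PySem.Str.find st e > -1 then acc3 ++ [e] else acc3) acc2) acc)
    ([] : List String)]
  have hbody : ∀ (fm : List (List String)) (acc : List String),
      (PySem.List.pyRange 0 (fm.length : Int) 1).foldl (fun acc2 o =>
        (PySem.List.pyGetD fm o []).foldl (fun acc3 e =>
          if PySem.Str.find st e > -1 then acc3 ++ [e] else acc3) acc2) acc =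
      acc ++ fm.flatMap (fun fmo =>
        fmo.filter (fun e => decide (PySem.Str.find st e > -1))) := by
    intro fm acc
    rw [PySem.List.foldl_pyRange_zero_pyGetD']
    have hinner : ∀ (fmo : List String) (acc2 : List String),
        fmo.foldl (fun acc3 e =>
          if PySem.Str.find st e > -1 then acc3 ++ [e] else acc3) acc2 =
        acc2 ++ fmo.filter (fun e => decide (PySem.Str.find st e > -1)) := by
      intro fmo acc2
      have := PySem.List.foldl_append_if
        (p := fun e => decide (PySem.Str.find st e > -1)) (f := id)
        (l := fmo) (acc := acc2)
      simpa using this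
    calc fm.foldl (fun acc2 fmo =>
          fmo.foldl (fun acc3 e =>
            if PySem.Str.find st e > -1 then acc3 ++ [e] else acc3) acc2) acc
        = fm.foldl (fun acc2 fmo =>
            acc2 ++ fmo.filter (fun e => decide (PySem.Str.find st e > -1))) acc := by
          exact PySem.List.foldl_congr_mem _ _ _ _ (fun acc2 fmo _ => hinner fmo acc2)
      _ = acc ++ fm.flatMap (fun fmo =>
            fmo.filter (fun e => decide (PySem.Str.find st e > -1))) :=
          pv_foldl_blocks _ fm acc
  have hA : L.foldl (fun acc fm =>
      (PySem.List.pyRange 0 (fm.length : Int) 1).foldl (fun acc2 o =>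
        (PySem.List.pyGetD fm o []).foldl (fun acc3 e =>
          if PySem.Str.find st e > -1 then acc3 ++ [e] else acc3) acc2) acc) [] =
      L.flatMap (fun fm => fm.flatMap (fun fmo =>
        fmo.filter (fun e => decide (PySem.Str.find st e > -1)))) := by
    calc L.foldl (fun acc fm =>
          (PySem.List.pyRange 0 (fm.length : Int) 1).foldl (fun acc2 o =>
            (PySem.List.pyGetD fm o []).foldl (fun acc3 e =>
              if PySem.Str.find st e > -1 then acc3 ++ [e] else acc3) acc2) acc) []
        = L.foldl (fun acc fm => acc ++ fm.flatMap (fun fmo =>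
            fmo.filter (fun e => decide (PySem.Str.find st e > -1)))) [] := by
          exact PySem.List.foldl_congr_mem _ _ _ _ (fun acc fm _ => hbody fm acc)
      _ = L.flatMap (fun fm => fm.flatMap (fun fmo =>
            fmo.filter (fun e => decide (PySem.Str.find st e > -1)))) := by
          simpa using pv_foldl_blocks
            (fun fm => fm.flatMap (fun fmo =>
              fmo.filter (fun e => decide (PySem.Str.find st e > -1)))) L []
  rw [hA]
  simp [pvFlatten, pvFlat3, pvFlat2, pvFlat1, List.flatMap_def, List.filter_flatten,
    List.map_map, Function.comp_def, pv_flatten_map_filter_singleton]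

-- B's let-chain, written out
theorem pv_alt_eq (st : String) (L : List (List (List String))) :
    get_components_from_formula_alt st L
      = (pvFlatten L).filter (fun e =>
          PySem.Set.contains
            (PySem.Set.ofList
              ((PySem.Set.ofList ((pvFlatten L).map (fun e => PySem.Str.len e))).flatMap (fun l =>
                (PySem.List.pyRange 0 (PySem.Str.len st - l + 1) 1).map
                  (fun i => PySem.Str.slice st (some i) (some (i + l)))))) e) := rfl

-- ===== VERDICT (by name: the statement is the Claim_ definition above) =====
theorem get_components_from_formula_spec : Claim_equal_get_components_from_formula := by
  intro st factor_list _hdom hpre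
  obtain ⟨h1, h2, h3⟩ := hpre
  unfold Spec_get_components_from_formula
  obtain ⟨f0, fl', rfl⟩ : ∃ f0 fl', factor_list = f0 :: fl' :=
    ⟨factor_list.headI, factor_list.tail, (List.cons_head!_tail h1).symm⟩
  simp only [List.headI] at h2 h3
  obtain ⟨f00, f0', rfl⟩ : ∃ f00 f0', f0 = f00 :: f0' :=
    ⟨f0.headI, f0.tail, (List.cons_head!_tail h2).symm⟩
  obtain ⟨c, f00', rfl⟩ : ∃ c f00', f00 = c :: f00' :=
    ⟨f00.headI, f00.tail, (List.cons_head!_tail h3).symm⟩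
  rw [pv_A_eq_filter st _ c f00' f0' fl' rfl, pv_alt_eq]
  symm
  apply List.filter_congr
  intro e he
  exact pv_index_mem st (pvFlatten (((c :: f00') :: f0') :: fl')) e he
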